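-- pv_equiv track=rewrite | github.com/QQxiaoming/quard_star_tutorial | target_root_app/qt-everywhere-src-5.12.11/qtvirtualkeyboard/src/plugins/t9write/3rdparty/t9write/unpack.py | blacklist
-- ===== SOURCE A (Python) =====
-- import fnmatch
--
-- BLACKLIST_RULES = [
-- '*__MACOSX*',
-- '*/.DS_Store',
-- ]
--
-- def blacklist(file_list):
--     result = []
--     for file_name in file_list:
--         match = False
--         for blacklist_rule in BLACKLIST_RULES:
--             match = fnmatch.fnmatch(file_name, blacklist_rule)
--             if match:
--                 break
--         if not match:
--             result.append(file_name)
--     return result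
-- ===== SOURCE B (Python) =====
-- BLACKLIST_RULES = [
-- '*__MACOSX*',
-- '*/.DS_Store',
-- ]
--
-- def blacklist(file_list):
--     # The glob rules are constants: '*__MACOSX*' is a substring test and
--     # '*/.DS_Store' is a suffix test, so no pattern engine is needed.
--     return [f for f in file_list
--             if '__MACOSX' not in f and not f.endswith('/.DS_Store')]
-- ===== Notes on version B (the rewrite author's own statement) =====
-- stated objective: simpler
-- what changed: B replaces A's per-name loop over glob rules driven by fnmatch with a single list comprehension using direct string tests ('__MACOSX' substring, '/.DS_Store' suffix) that the two constant patterns denote; no pattern-matching engine at all.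
import Mathlib
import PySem

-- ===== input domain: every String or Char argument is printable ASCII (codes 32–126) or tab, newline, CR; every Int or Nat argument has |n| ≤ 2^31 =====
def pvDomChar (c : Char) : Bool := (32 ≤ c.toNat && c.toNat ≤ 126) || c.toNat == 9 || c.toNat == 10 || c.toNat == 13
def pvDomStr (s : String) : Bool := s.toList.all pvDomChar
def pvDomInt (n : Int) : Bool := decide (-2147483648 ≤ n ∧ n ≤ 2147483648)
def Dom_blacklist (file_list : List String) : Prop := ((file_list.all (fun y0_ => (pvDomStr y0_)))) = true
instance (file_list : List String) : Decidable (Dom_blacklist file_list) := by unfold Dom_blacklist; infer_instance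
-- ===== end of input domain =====

-- B replaces A's per-name glob-rule loop with direct string tests (substring / suffix) that the
-- two constant patterns denote; no pattern engine (objective: simpler).

-- ===== PORT A =====
-- Shared port of the library call fnmatch.fnmatch (POSIX, case-sensitive): a glob matcher
-- handling '*' and '?'; exact for patterns without '[' bracket classes — both BLACKLIST_RULES
-- patterns ('*__MACOSX*', '*/.DS_Store') contain only '*' and literal characters.
def pvGlob : List Char → List Char → Bool
  | [], s => s.isEmpty
  | p :: ps, s =>
    if p = '*' then
      pvGlob ps s ||
        (match s with
         | [] => false
         | _ :: t => pvGlob (p :: ps) t)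
    else
      match s with
      | [] => false
      | c :: t => (p == '?' || p == c) && pvGlob ps t
  termination_by pat s => (pat.length, s.length)

def pvFnmatch (name pat : String) : Bool := pvGlob pat.toList name.toList

def pvRules : List String := ["*__MACOSX*", "*/.DS_Store"]

-- A's inner 'for blacklist_rule in BLACKLIST_RULES' loop with its early break
def pvInnerA (name : String) : List String → Bool
  | [] => false
  | r :: rs =>
    let m := pvFnmatch name r
    if m then m else pvInnerA name rs

def blacklist (file_list : List String) : List String :=
  file_list.foldl
    (fun result file_name =>
      if !(pvInnerA file_name pvRules) then result ++ [file_name] else result)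
    []

-- ===== PORT B =====
def blacklist_alt (file_list : List String) : List String :=
  file_list.filter (fun f =>
    !(PySem.Str.isIn "__MACOSX" f) && !(PySem.Str.endswith f "/.DS_Store"))

-- ===== PRECONDITION & SPEC =====
def Spec_blacklist (file_list : List String) (out : List String) : Prop := out = blacklist_alt file_list
instance (file_list : List String) (out : List String) : Decidable (Spec_blacklist file_list out) := by unfold Spec_blacklist; infer_instance

-- ===== CLAIM (what is proved, stated in full; the proofs are below) =====
def Claim_equal_blacklist : Prop := ∀ (file_list : List String), Dom_blacklist file_list → Spec_blacklist file_list (blacklist file_list)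

-- ===== LEMMAS AND PROOFS =====

set_option maxRecDepth 8192

theorem pvGlob_star_only (s : List Char) : pvGlob ['*'] s = true := by
  induction s with
  | nil => simp [pvGlob]
  | cons c t ih => simp [pvGlob, ih]

theorem pvGlob_star (ps : List Char) (s : List Char) :
    pvGlob ('*' :: ps) s = s.tails.any (fun t => pvGlob ps t) := by
  induction s with
  | nil => simp [pvGlob]
  | cons c t ih => simp [pvGlob, ih]

theorem pvGlob_lit_exact (L : List Char)
    (hL : (L.all fun c => !(c == '*') && !(c == '?')) = true)
    (s : List Char) : pvGlob L s = decide (s = L) := by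
  induction L generalizing s with
  | nil => cases s <;> simp [pvGlob, List.isEmpty]
  | cons p ps ih =>
      rw [List.all_cons, Bool.and_eq_true] at hL
      obtain ⟨hp, hps⟩ := hL
      rw [Bool.and_eq_true] at hp
      have hstar : p ≠ '*' := by simpa using hp.1
      have hq : (p == '?') = false := by simpa using hp.2
      cases s with
      | nil => simp [pvGlob, hstar]
      | cons c t =>
          simp only [pvGlob, if_neg hstar, hq, Bool.false_or, ih hps]
          by_cases h : p = c
          · subst h; simp
          · simp [h, Ne.symm h]

theorem pvGlob_lit_star (L : List Char)
    (hL : (L.all fun c => !(c == '*') && !(c == '?')) = true)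
    (s : List Char) : pvGlob (L ++ ['*']) s = L.isPrefixOf s := by
  induction L generalizing s with
  | nil => simp [pvGlob_star_only, List.isPrefixOf]
  | cons p ps ih =>
      rw [List.all_cons, Bool.and_eq_true] at hL
      obtain ⟨hp, hps⟩ := hL
      rw [Bool.and_eq_true] at hp
      have hstar : p ≠ '*' := by simpa using hp.1
      have hq : (p == '?') = false := by simpa using hp.2
      cases s with
      | nil => simp [pvGlob, hstar, List.isPrefixOf]
      | cons c t =>
          simp only [List.cons_append, pvGlob, if_neg hstar, hq, Bool.false_or,
            ih hps, List.isPrefixOf]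

theorem pvMatch_macosx (f : String) :
    pvFnmatch f "*__MACOSX*" = PySem.Str.isIn "__MACOSX" f := by
  have hpat : "*__MACOSX*".toList = '*' :: ("__MACOSX".toList ++ ['*']) := by decide
  have hlit : (("__MACOSX".toList).all fun c => !(c == '*') && !(c == '?')) = true := by
    decide
  rw [pvFnmatch, hpat, pvGlob_star]
  rw [Bool.eq_iff_iff, List.any_eq_true, PySem.Str.isIn_iff_infix,
    List.infix_iff_prefix_suffix]
  constructor
  · rintro ⟨t, ht, hg⟩
    rw [pvGlob_lit_star _ hlit] at hg
    exact ⟨t, List.isPrefixOf_iff_prefix.mp hg, (List.mem_tails _ _).mp ht⟩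
  · rintro ⟨t, hp, hs⟩
    exact ⟨t, (List.mem_tails _ _).mpr hs,
      by rw [pvGlob_lit_star _ hlit]; exact List.isPrefixOf_iff_prefix.mpr hp⟩

theorem pvMatch_dsstore (f : String) :
    pvFnmatch f "*/.DS_Store" = PySem.Str.endswith f "/.DS_Store" := by
  have hpat : "*/.DS_Store".toList = '*' :: "/.DS_Store".toList := by decide
  have hlit : (("/.DS_Store".toList).all fun c => !(c == '*') && !(c == '?')) = true := by
    decide
  rw [pvFnmatch, hpat, pvGlob_star, PySem.Str.endswith_eq]
  rw [Bool.eq_iff_iff, List.any_eq_true, PySem.Chars.endswith_iff]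
  constructor
  · rintro ⟨t, ht, hg⟩
    rw [pvGlob_lit_exact _ hlit] at hg
    rw [decide_eq_true_iff] at hg
    subst hg
    exact (List.mem_tails _ _).mp ht
  · intro hs
    exact ⟨_, (List.mem_tails _ _).mpr hs, by rw [pvGlob_lit_exact _ hlit]; simp⟩

theorem pv_if_self_or (b c : Bool) : (if b = true then b else c) = (b || c) := by
  cases b <;> simp

theorem blacklist_spec : Claim_equal_blacklist := by
  intro file_list _
  unfold Spec_blacklist blacklist blacklist_alt
  rw [PySem.List.foldl_append_if_eq_filter]
  simp only [List.nil_append]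
  apply List.filter_congr
  intro f _
  simp only [pvInnerA, pvRules, pvMatch_macosx, pvMatch_dsstore, pv_if_self_or,
    Bool.or_false, Bool.not_or]
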